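-- pv_equiv track=rewrite | github.com/NonomiyaIzumi/DAP | scripts/generate_rvisa_stage1.py | parse_polarity_fcfs
-- ===== SOURCE A (Python) =====
-- from typing import Any, Dict, List, Optional, Tuple
--
-- LABEL_LIST = ["positive", "negative", "neutral"]
--
-- def parse_polarity_fcfs(text: str) -> Optional[str]:
--     """Parse label using First-Come-First-Served (first mention)."""
--     if not text:
--         return None
--     lower = text.lower()
--     hits: List[Tuple[int, str]] = []
--     for label in LABEL_LIST:
--         idx = lower.find(label)
--         if idx >= 0:
--             hits.append((idx, label))
--     if not hits:
--         return None
--     hits.sort(key=lambda x: x[0])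
--     return hits[0][1]
-- ===== SOURCE B (Python) =====
-- LABEL_LIST = ["positive", "negative", "neutral"]
--
-- def parse_polarity_fcfs(text):
--     """Parse label using First-Come-First-Served (first mention)."""
--     lower = text.lower()
--     for i in range(len(lower)):
--         for label in LABEL_LIST:
--             if lower.startswith(label, i):
--                 return label
--     return None
-- ===== Notes on version B (the rewrite author's own statement) =====
-- stated objective: alternative
-- what changed: Instead of computing each label's find() index, collecting hits and sorting them, B scans the lowercased text left-to-right once and returns the first label that starts at the current position.
import Mathlib
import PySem

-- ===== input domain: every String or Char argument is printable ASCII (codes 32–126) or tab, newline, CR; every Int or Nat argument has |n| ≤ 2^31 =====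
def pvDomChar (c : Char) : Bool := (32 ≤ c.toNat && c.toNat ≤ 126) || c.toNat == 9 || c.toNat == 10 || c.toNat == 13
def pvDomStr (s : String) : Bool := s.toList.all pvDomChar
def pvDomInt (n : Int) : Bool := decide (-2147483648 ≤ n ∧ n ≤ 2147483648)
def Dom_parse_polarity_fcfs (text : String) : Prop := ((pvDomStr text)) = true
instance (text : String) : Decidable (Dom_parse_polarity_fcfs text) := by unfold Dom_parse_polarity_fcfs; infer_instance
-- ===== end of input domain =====

-- B replaces A's "find each label's index, collect the hits, sort them, take the first" with a
-- single left-to-right scan over positions returning the first label that starts there (objective: alternative).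

def LABEL_LIST : List String := ["positive", "negative", "neutral"]

-- ===== PORT A =====
def parse_polarity_fcfs (text : String) : Option String :=
  if text = "" then none
  else
    let lower := PySem.Str.lower text
    let hits : List (Int × String) := LABEL_LIST.foldl (fun hs label =>
      let idx := PySem.Str.find lower label
      if 0 ≤ idx then hs ++ [(idx, label)] else hs) []
    if hits = [] then none
    else
      match PySem.List.sorted hits (fun x => x.1) with
      | [] => none   -- unreachable: hits ≠ []
      | h :: _ => some h.2

-- ===== PORT B =====
-- Source B's `for i in range(len(lower))` loop is structural recursion over the suffixes of `lower`
-- (suffix k ↔ position i = k); `lower.startswith(label, i)` is `startswith (drop i lower) label`,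
-- exact for 0 ≤ i ≤ len(lower); the inner `for label in LABEL_LIST: if …: return label` is findSome?.
def pvScanB : List Char → Option String
  | [] => none
  | c :: rest =>
    match LABEL_LIST.findSome? (fun label =>
        if PySem.Chars.startswith (c :: rest) label.toList then some label else none) with
    | some l => some l
    | none => pvScanB rest

def parse_polarity_fcfs_alt (text : String) : Option String :=
  pvScanB (PySem.Chars.lower text.toList)

-- ===== PRECONDITION & SPEC =====
def Spec_parse_polarity_fcfs (text : String) (out : Option String) : Prop := out = parse_polarity_fcfs_alt text
instance (text : String) (out : Option String) : Decidable (Spec_parse_polarity_fcfs text out) := by unfold Spec_parse_polarity_fcfs; infer_instance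

-- ===== CLAIM (what is proved, stated in full; the proofs are below) =====
def Claim_equal_parse_polarity_fcfs : Prop := ∀ (text : String), Dom_parse_polarity_fcfs text → Spec_parse_polarity_fcfs text (parse_polarity_fcfs text)

-- ===== LEMMAS AND PROOFS =====

-- the value both programs compute, as a function of the three find-indices (each ≥ -1);
-- ties go to the earlier label of LABEL_LIST, matching both A's stable sort and B's inner loop order
def pvSel (f1 f2 f3 : Int) : Option String :=
  if 0 ≤ f1 ∧ (f2 < 0 ∨ f1 ≤ f2) ∧ (f3 < 0 ∨ f1 ≤ f3) then some "positive"
  else if 0 ≤ f2 ∧ (f3 < 0 ∨ f2 ≤ f3) then some "negative"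
  else if 0 ≤ f3 then some "neutral"
  else none

-- how Python's find unfolds one character: 0 if the pattern starts here, else the shifted find on the tail
lemma find_cons (p : List Char) (c : Char) (r : List Char) :
    PySem.Chars.find (c :: r) p =
      if p <+: (c :: r) then 0
      else if PySem.Chars.find r p = -1 then -1 else PySem.Chars.find r p + 1 := by
  by_cases hpre : p <+: (c :: r)
  · have h0 : 0 ≤ PySem.Chars.find (c :: r) p :=
      (PySem.Chars.find_nonneg_iff _ _).2 hpre.isInfix
    obtain ⟨h1, h2⟩ := PySem.Chars.find_spec h0
    have ht : (PySem.Chars.find (c :: r) p).toNat = 0 := by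
      by_contra hne
      exact (h2 0 (Nat.pos_of_ne_zero hne)) (by simpa using hpre)
    rw [if_pos hpre]; omega
  · rw [if_neg hpre]
    by_cases hinf : p <:+: r
    · have hk : 0 ≤ PySem.Chars.find r p := (PySem.Chars.find_nonneg_iff _ _).2 hinf
      have hm : 0 ≤ PySem.Chars.find (c :: r) p :=
        (PySem.Chars.find_nonneg_iff _ _).2 (List.infix_cons_iff.2 (Or.inr hinf))
      obtain ⟨hm1, hm2⟩ := PySem.Chars.find_spec hm
      obtain ⟨hk1, hk2⟩ := PySem.Chars.find_spec hk
      set M := (PySem.Chars.find (c :: r) p).toNat with hM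
      set K := (PySem.Chars.find r p).toNat with hK
      have hMpos : M ≠ 0 := by
        intro h0
        rw [h0] at hm1; simp at hm1; exact hpre hm1
      have hdrop : List.drop M (c :: r) = List.drop (M - 1) r := by
        conv_lhs => rw [show M = (M-1) + 1 by omega, List.drop_succ_cons]
      have hge : ¬ (M - 1 < K) := fun hlt => (hk2 _ hlt) (hdrop ▸ hm1)
      have hle : ¬ (K + 1 < M) := fun hlt => (hm2 _ hlt) (by simpa [List.drop_succ_cons] using hk1)
      have hkne : PySem.Chars.find r p ≠ -1 := by omega
      rw [if_neg hkne]; omega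
    · have h1 : PySem.Chars.find r p = -1 := (PySem.Chars.find_eq_neg_one_iff _ _).2 hinf
      have h2 : PySem.Chars.find (c :: r) p = -1 := by
        rw [PySem.Chars.find_eq_neg_one_iff]
        intro hin
        rcases List.infix_cons_iff.1 hin with h | h
        · exact hpre h
        · exact hinf h
      rw [h1, h2]; simp

-- pvSel is invariant under shifting all three indices by one position (the cons step of B's scan)
lemma sel_shift (k1 k2 k3 : Int) (h1 : -1 ≤ k1) (h2 : -1 ≤ k2) (h3 : -1 ≤ k3) :
    pvSel (if k1 = -1 then -1 else k1 + 1) (if k2 = -1 then -1 else k2 + 1)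
          (if k3 = -1 then -1 else k3 + 1) = pvSel k1 k2 k3 := by
  unfold pvSel; split_ifs <;> first | rfl | omega

-- B's position scan computes pvSel of the three find-indices
lemma scanB_eq (l : List Char) :
    pvScanB l = pvSel (PySem.Chars.find l "positive".toList)
                      (PySem.Chars.find l "negative".toList)
                      (PySem.Chars.find l "neutral".toList) := by
  induction l with
  | nil => decide
  | cons c r ih =>
    rw [pvScanB]
    rw [find_cons, find_cons, find_cons]
    simp only [LABEL_LIST, List.findSome?_cons, List.findSome?_nil]
    by_cases e1 : "positive".toList <+: (c :: r)
    · have : PySem.Chars.startswith (c :: r) "positive".toList = true :=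
        (PySem.Chars.startswith_iff _ _).2 e1
      simp only [this, if_pos e1, if_true]
      have := PySem.Chars.neg_one_le_find r "negative".toList
      have := PySem.Chars.neg_one_le_find r "neutral".toList
      unfold pvSel
      split_ifs <;> first | rfl | omega
    · have hs1 : PySem.Chars.startswith (c :: r) "positive".toList = false := by
        rw [← Bool.not_eq_true, PySem.Chars.startswith_iff _ _]; exact e1
      simp only [if_neg e1, hs1, Bool.false_eq_true, if_false]
      by_cases e2 : "negative".toList <+: (c :: r)
      · have : PySem.Chars.startswith (c :: r) "negative".toList = true :=
          (PySem.Chars.startswith_iff _ _).2 e2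
        simp only [this, if_pos e2, if_true]
        have := PySem.Chars.neg_one_le_find r "positive".toList
        have := PySem.Chars.neg_one_le_find r "neutral".toList
        unfold pvSel
        split_ifs <;> first | rfl | omega
      · have hs2 : PySem.Chars.startswith (c :: r) "negative".toList = false := by
          rw [← Bool.not_eq_true, PySem.Chars.startswith_iff _ _]; exact e2
        simp only [if_neg e2, hs2, Bool.false_eq_true, if_false]
        by_cases e3 : "neutral".toList <+: (c :: r)
        · have : PySem.Chars.startswith (c :: r) "neutral".toList = true :=
            (PySem.Chars.startswith_iff _ _).2 e3
          simp only [this, if_pos e3, if_true]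
          have := PySem.Chars.neg_one_le_find r "positive".toList
          have := PySem.Chars.neg_one_le_find r "negative".toList
          unfold pvSel
          split_ifs <;> first | rfl | omega
        · have hs3 : PySem.Chars.startswith (c :: r) "neutral".toList = false := by
            rw [← Bool.not_eq_true, PySem.Chars.startswith_iff _ _]; exact e3
          simp only [if_neg e3, hs3, Bool.false_eq_true, if_false]
          rw [ih]
          exact (sel_shift _ _ _ (PySem.Chars.neg_one_le_find _ _)
            (PySem.Chars.neg_one_le_find _ _) (PySem.Chars.neg_one_le_find _ _)).symm

-- A's collect-sort-head computes pvSel of the three find-indices (on nonempty text)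
lemma portA_eq (text : String) (h : ¬ text = "") :
    parse_polarity_fcfs text =
      pvSel (PySem.Chars.find (PySem.Chars.lower text.toList) "positive".toList)
            (PySem.Chars.find (PySem.Chars.lower text.toList) "negative".toList)
            (PySem.Chars.find (PySem.Chars.lower text.toList) "neutral".toList) := by
  simp only [parse_polarity_fcfs, if_neg h, LABEL_LIST, List.foldl_cons, List.foldl_nil,
    List.nil_append, PySem.Str.find_eq, PySem.Str.toList_lower]
  have h1 := PySem.Chars.neg_one_le_find (PySem.Chars.lower text.toList) "positive".toList
  have h2 := PySem.Chars.neg_one_le_find (PySem.Chars.lower text.toList) "negative".toList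
  have h3 := PySem.Chars.neg_one_le_find (PySem.Chars.lower text.toList) "neutral".toList
  generalize PySem.Chars.find (PySem.Chars.lower text.toList) "positive".toList = a at *
  generalize PySem.Chars.find (PySem.Chars.lower text.toList) "negative".toList = b at *
  generalize PySem.Chars.find (PySem.Chars.lower text.toList) "neutral".toList = c at *
  unfold pvSel
  by_cases ha : 0 ≤ a <;> by_cases hb : 0 ≤ b <;> by_cases hc : 0 ≤ c <;>
    simp [ha, hb, hc, PySem.List.sorted_eq_foldl_insertBy, PySem.List.insertBy] <;>
    split_ifs <;>
    first
      | rfl | omega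
      | (simp only [PySem.List.insertBy, decide_eq_true_eq]
         split_ifs <;> first | rfl | omega)

-- ===== VERDICT (by name: the statement is the Claim_ definition above) =====
theorem parse_polarity_fcfs_spec : Claim_equal_parse_polarity_fcfs := by
  intro text _
  unfold Spec_parse_polarity_fcfs parse_polarity_fcfs_alt
  by_cases h : text = ""
  · subst h
    decide
  · rw [portA_eq text h, scanB_eq]
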